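-- pv_equiv track=rewrite | github.com/slimebob1975/JBGautoclass-jupyter | src/IAFautoclass/IAFautomaticClassiphyer.py | find_smallest_class_number
-- ===== SOURCE A (Python) =====
-- def find_smallest_class_number(Y):
--
--     class_count = {}
--     for elem in Y:
--         if elem not in class_count:
--             class_count[elem] = 1
--         else:
--             class_count[elem] += 1
--     return max(1, min(class_count.values()));
-- ===== SOURCE B (Python) =====
-- def find_smallest_class_number(Y):
--     items = sorted(Y)
--     run_lengths = []
--     prev = None
--     for v in items:
--         if v != prev:
--             run_lengths.append(1)
--         else:
--             run_lengths[-1] += 1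
--         prev = v
--     return max(1, min(run_lengths))
-- ===== Notes on version B (the rewrite author's own statement) =====
-- stated objective: alternative
-- what changed: Replaces the frequency-dictionary construction with sort-then-scan: sort the labels so equal labels become contiguous runs, collect the run lengths in one linear scan, and return max(1, min(run_lengths)).
import Mathlib
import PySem

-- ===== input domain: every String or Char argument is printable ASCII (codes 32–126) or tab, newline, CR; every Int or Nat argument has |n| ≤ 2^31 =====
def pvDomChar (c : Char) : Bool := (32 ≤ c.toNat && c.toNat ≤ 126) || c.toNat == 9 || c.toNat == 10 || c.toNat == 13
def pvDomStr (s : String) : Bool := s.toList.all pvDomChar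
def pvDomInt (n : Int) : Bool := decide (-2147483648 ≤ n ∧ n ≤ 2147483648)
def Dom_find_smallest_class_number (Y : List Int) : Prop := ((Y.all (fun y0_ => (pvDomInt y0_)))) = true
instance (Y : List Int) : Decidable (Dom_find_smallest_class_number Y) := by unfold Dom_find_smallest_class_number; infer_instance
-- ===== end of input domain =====

-- B replaces A's frequency dictionary by sort-then-scan: sort the labels, collect run lengths in one pass, return max(1, min of them).
-- ===== PORT A =====
def find_smallest_class_number (Y : List Int) : Int :=
  let class_count : PySem.Dict Int Int :=
    Y.foldl (fun d elem =>
      if d.contains elem = false then d.insert elem 1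
      else d.modify elem 0 (· + 1)) PySem.Dict.empty
  max 1 ((PySem.List.min? class_count.values (fun v => v)).getD 0)

-- ===== PORT B =====
-- the loop body: 'run_lengths[-1] += 1' is dropLast ++ [last + 1] (the last element read Python-style at index -1)
def pvStepB (st : List Int × Option Int) (v : Int) : List Int × Option Int :=
  (if some v ≠ st.2 then st.1 ++ [(1 : Int)]
   else st.1.dropLast ++ [PySem.List.pyGetD st.1 (-1) 0 + 1], some v)

def find_smallest_class_number_alt (Y : List Int) : Int :=
  let items := PySem.List.sorted Y (fun x => x) false
  let st := items.foldl pvStepB ([], none)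
  max 1 ((PySem.List.min? st.1 (fun v => v)).getD 0)

-- ===== PRECONDITION & SPEC =====
-- Pre_ excludes only the empty list, on which Python's min() raises ValueError in both A and B.
def Pre_find_smallest_class_number (Y : List Int) : Prop := Y ≠ []
instance (Y : List Int) : Decidable (Pre_find_smallest_class_number Y) := by unfold Pre_find_smallest_class_number; infer_instance
def pvWitness_find_smallest_class_number : List Int := [1, 2, 1]
def Spec_find_smallest_class_number (Y : List Int) (out : Int) : Prop := out = find_smallest_class_number_alt Y
instance (Y : List Int) (out : Int) : Decidable (Spec_find_smallest_class_number Y out) := by unfold Spec_find_smallest_class_number; infer_instance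

-- ===== CLAIM (what is proved, stated in full; the proofs are below) =====
def Claim_equal_find_smallest_class_number : Prop := ∀ (Y : List Int), Dom_find_smallest_class_number Y → Pre_find_smallest_class_number Y → Spec_find_smallest_class_number Y (find_smallest_class_number Y)

-- ===== LEMMAS AND PROOFS =====

-- A's loop body coincides with the Counter step: on a missing key, "insert 1" is "modify x 0 (+1)".
lemma loopA_eq_counter_step (d : PySem.Dict Int Int) (x : Int) :
    (if d.contains x = false then d.insert x 1 else d.modify x 0 (· + 1)) = d.modify x 0 (· + 1) := by
  by_cases h : d.contains x = false
  · simp only [h, PySem.Dict.modify, PySem.Dict.getD_of_not_contains d 0 h]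
    simp
  · simp [h]

lemma dictA_eq_counter (Y : List Int) :
    Y.foldl (fun d elem =>
      if d.contains elem = false then d.insert elem 1
      else d.modify elem 0 (· + 1)) PySem.Dict.empty = PySem.Dict.counter Y := by
  rw [PySem.Dict.counter_eq_foldl]
  exact PySem.List.foldl_congr_mem _ _ _ _ (fun d x _ => loopA_eq_counter_step d x)

-- min with the identity key depends only on the multiset of values
lemma min?_id_perm {l₁ l₂ : List Int} (h : l₁.Perm l₂) :
    PySem.List.min? l₁ (fun v => v) = PySem.List.min? l₂ (fun v => v) := by
  cases h1 : PySem.List.min? l₁ (fun v => v) with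
  | none =>
    rw [PySem.List.min?_eq_none_iff] at h1
    subst h1
    rw [eq_comm, PySem.List.min?_eq_none_iff, ← h.nil_eq]
  | some m1 =>
    cases h2 : PySem.List.min? l₂ (fun v => v) with
    | none =>
      rw [PySem.List.min?_eq_none_iff] at h2; subst h2
      rw [h.eq_nil] at h1; simp [PySem.List.min?] at h1
    | some m2 =>
      have hm1 := PySem.List.min?_mem h1
      have hm2 := PySem.List.min?_mem h2
      exact congrArg some (le_antisymm (PySem.List.min?_isMin h1 m2 (h.mem_iff.2 hm2))
        (PySem.List.min?_isMin h2 m1 (h.mem_iff.1 hm1)))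

lemma pyGetD_append_neg_one (l : List Int) (a : Int) :
    PySem.List.pyGetD (l ++ [a]) (-1) 0 = a := by
  simp [PySem.List.pyGetD, PySem.List.pyGet?, PySem.List.pyIdx?]

lemma dedup_sublist (l : List Int) : List.Sublist (PySem.List.dedup l) l := by
  induction l using List.reverseRecOn with
  | nil => simp [PySem.List.dedup]
  | append_singleton xs x ih =>
    simp only [PySem.List.dedup_eq_ofList, PySem.Set.ofList_append_singleton, PySem.Set.add] at *
    split
    · exact ih.trans (List.sublist_append_left _ _)
    · exact List.Sublist.append ih (List.Sublist.refl _)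

lemma getLast?_eq_of_ub {l : List Int} {x : Int} (hp : l.Pairwise (· ≤ ·))
    (hx : x ∈ l) (hub : ∀ y ∈ l, y ≤ x) : l.getLast? = some x := by
  rcases List.eq_nil_or_concat l with rfl | ⟨l', a, rfl⟩
  · simp at hx
  · simp only [List.concat_eq_append] at *
    rw [List.getLast?_concat]
    rw [List.pairwise_append] at hp
    have hax : a ≤ x := hub a (by simp)
    rcases List.mem_append.1 hx with h | h
    · exact congrArg some (le_antisymm hax (hp.2.2 x h a (by simp)))
    · simp at h; rw [h]

lemma foldB_sorted (xs : List Int) (hp : xs.Pairwise (· ≤ ·)) :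
    xs.foldl pvStepB ([], none)
      = ((PySem.List.dedup xs).map (fun c => ((xs.count c : Nat) : Int)), xs.getLast?) := by
  induction xs using List.reverseRecOn with
  | nil => rfl
  | append_singleton xs x ih =>
    have hp' : xs.Pairwise (· ≤ ·) := (List.pairwise_append.1 hp).1
    have hub : ∀ y ∈ xs, y ≤ x := fun y hy => (List.pairwise_append.1 hp).2.2 y hy x (by simp)
    rw [List.foldl_append, ih hp', List.foldl_cons, List.foldl_nil]
    by_cases hmem : x ∈ xs
    · have hlast : xs.getLast? = some x := getLast?_eq_of_ub hp' hmem hub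
      have hded : PySem.List.dedup (xs ++ [x]) = PySem.List.dedup xs := by
        simp [PySem.List.dedup_eq_ofList, PySem.Set.ofList_append_singleton, PySem.Set.add,
          PySem.Set.contains, hmem]
      have hdlast : (PySem.List.dedup xs).getLast? = some x :=
        getLast?_eq_of_ub (List.Pairwise.sublist (dedup_sublist xs) hp')
          ((PySem.List.mem_dedup _ _).2 hmem) (fun y hy => hub y ((PySem.List.mem_dedup _ _).1 hy))
      obtain ⟨e, he⟩ := List.getLast?_eq_some_iff.1 hdlast
      have hxe : x ∉ e := by
        have hnd := PySem.List.nodup_dedup (xs := xs)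
        rw [he] at hnd
        simp [List.nodup_append] at hnd
        tauto
      rw [pvStepB, hlast, hded, he, List.getLast?_concat]
      simp only [ne_eq, not_true_eq_false, if_false, List.map_append, List.map_cons, List.map_nil,
        List.dropLast_concat, pyGetD_append_neg_one, Prod.mk.injEq, and_true]
      refine congrArg₂ (· ++ ·) ?_ ?_
      · apply List.map_congr_left
        intro c hc
        have hcx : c ≠ x := fun h => hxe (h ▸ hc)
        rw [List.count_append]
        simp [List.count_singleton]
        exact fun h => hcx h.symm
      · rw [List.count_append]
        simp
    · have hlne : some x ≠ xs.getLast? := by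
        intro hcontra
        exact hmem (List.mem_of_getLast? hcontra.symm)
      have hded : PySem.List.dedup (xs ++ [x]) = PySem.List.dedup xs ++ [x] := by
        simp [PySem.List.dedup_eq_ofList, PySem.Set.ofList_append_singleton, PySem.Set.add,
          PySem.Set.contains, hmem]
      rw [pvStepB, if_pos hlne, hded, List.getLast?_concat]
      simp only [List.map_append, List.map_cons, List.map_nil, Prod.mk.injEq, and_true]
      refine congrArg₂ (· ++ ·) ?_ ?_
      · apply List.map_congr_left
        intro c hc
        have hcx : c ≠ x := fun h => hmem (h ▸ (PySem.List.mem_dedup _ _).1 hc)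
        rw [List.count_append]
        simp [List.count_singleton]
        exact fun h => hcx h.symm
      · rw [List.count_append]
        simp [List.count_eq_zero_of_not_mem hmem]

-- ===== VERDICT (by name: the statement is the Claim_ definition above) =====
theorem find_smallest_class_number_spec : Claim_equal_find_smallest_class_number := by
  intro Y _ _
  unfold Spec_find_smallest_class_number find_smallest_class_number find_smallest_class_number_alt
  simp only [dictA_eq_counter,
    foldB_sorted (PySem.List.sorted Y (fun x => x) false) (PySem.List.sorted_pairwise Y (fun x => x))]
  have hv : (PySem.Dict.counter Y).values
      = (PySem.Set.ofList Y).map (fun c => ((Y.count c : Nat) : Int)) := by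
    show ((PySem.Dict.counter Y).items).map (·.2) = _
    rw [PySem.Dict.items_counter]
    simp [List.map_map, Function.comp]
  have hdperm : (PySem.List.dedup (PySem.List.sorted Y (fun x => x) false)).Perm (PySem.Set.ofList Y) := by
    rw [List.perm_ext_iff_of_nodup (PySem.List.nodup_dedup _) (PySem.Set.nodup_ofList Y)]
    intro a
    rw [PySem.List.mem_dedup, PySem.Set.mem_ofList, PySem.List.mem_sorted]
  have hcnt : (PySem.List.dedup (PySem.List.sorted Y (fun x => x) false)).map
        (fun c => (((PySem.List.sorted Y (fun x => x) false).count c : Nat) : Int))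
      = (PySem.List.dedup (PySem.List.sorted Y (fun x => x) false)).map
        (fun c => ((Y.count c : Nat) : Int)) := by
    apply List.map_congr_left
    intro c _
    rw [(PySem.List.sorted_perm Y (fun x => x) false).count_eq]
  have hperm := hcnt ▸ hdperm.map (fun c => ((Y.count c : Nat) : Int))
  rw [hv, min?_id_perm hperm.symm]
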